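-- pv_equiv track=rewrite | github.com/bingle-a81/prog_dz | src/func_pandas.py | zamena
-- ===== SOURCE A (Python) =====
-- def zamena(x):
--     machine_dict={'Nomura NN32-YB3': ['Nomura NN-32YB3'],
--                    'Nomura NN-10E': ['Nomura NN-10E'],
--                      'Nomura NN-20J2(1,2,3)': ['Nomura NN-20J2 (1)', 'Nomura NN-20J2 (2)', 'Nomura NN-20J2 (3)'],
--                        'Nomura NN-20J3(4,5)': ['Nomura NN-20J3 (4)', 'Nomura NN-20J3 (5)'],
--                          'Nomura NN-20J3XB80(6)': ['Nomura NN-20J3 (6)'],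
--                          'Tsugami BO126 TF-III': ['Tsugami BO126TF-III'],
--                            'Tsugami BO126 TF-V': ['Tsugami BO126TF-5'],
--                            'Tsugami SS267-III': ['Tsugami SS267-III'],
--                              'Tsugami M08SY-II': ['Tsugami M08SY-II'],
--                              'Hanhwa XD20H': ['Hanwha XD20H'],
--                              'Nexturn SA-26PY': ['Nexturn SA-26PY'],
--                              'Nexturn SA-12B': ['Nexturn SA-12B (1)', 'Nexturn SA-12B (2)'],
--                                'Miyano BNJ-42SY': ['Miyano BNJ-42SY'],
--                                  'Colchester T8MSY': ['Colchester T8MSY'],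
--                                    'SMEC-NS2100SY': ['SMEC NS2100SY'],
--                                      'Citizen Cincom L12(1)': ['Citizen Cincom L12 (1)'],
--                                      'Citizen Cincom L12(2)': ['Citizen Cincom L12 (2)'],
--                                        'TFC-125': ['TFC-125'], 'IRT': ['IRT'],
--                                        'NomuraNN-16UB5': ['Nomura NN-16UB5']}
--     for k,v in machine_dict.items():
--         for a in v:
--             if a==x:
--                 return k
-- ===== SOURCE B (Python) =====
-- # Sorted (alias, key) table + hand-written binary search instead of A's nested linear scan.
-- _SORTED_TABLE = [
--     ('Citizen Cincom L12 (1)', 'Citizen Cincom L12(1)'),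
--     ('Citizen Cincom L12 (2)', 'Citizen Cincom L12(2)'),
--     ('Colchester T8MSY', 'Colchester T8MSY'),
--     ('Hanwha XD20H', 'Hanhwa XD20H'),
--     ('IRT', 'IRT'),
--     ('Miyano BNJ-42SY', 'Miyano BNJ-42SY'),
--     ('Nexturn SA-12B (1)', 'Nexturn SA-12B'),
--     ('Nexturn SA-12B (2)', 'Nexturn SA-12B'),
--     ('Nexturn SA-26PY', 'Nexturn SA-26PY'),
--     ('Nomura NN-10E', 'Nomura NN-10E'),
--     ('Nomura NN-16UB5', 'NomuraNN-16UB5'),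
--     ('Nomura NN-20J2 (1)', 'Nomura NN-20J2(1,2,3)'),
--     ('Nomura NN-20J2 (2)', 'Nomura NN-20J2(1,2,3)'),
--     ('Nomura NN-20J2 (3)', 'Nomura NN-20J2(1,2,3)'),
--     ('Nomura NN-20J3 (4)', 'Nomura NN-20J3(4,5)'),
--     ('Nomura NN-20J3 (5)', 'Nomura NN-20J3(4,5)'),
--     ('Nomura NN-20J3 (6)', 'Nomura NN-20J3XB80(6)'),
--     ('Nomura NN-32YB3', 'Nomura NN32-YB3'),
--     ('SMEC NS2100SY', 'SMEC-NS2100SY'),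
--     ('TFC-125', 'TFC-125'),
--     ('Tsugami BO126TF-5', 'Tsugami BO126 TF-V'),
--     ('Tsugami BO126TF-III', 'Tsugami BO126 TF-III'),
--     ('Tsugami M08SY-II', 'Tsugami M08SY-II'),
--     ('Tsugami SS267-III', 'Tsugami SS267-III'),
-- ]
--
-- def zamena(x):
--     lo, hi = 0, len(_SORTED_TABLE)
--     while lo < hi:
--         mid = (lo + hi) // 2
--         alias, key = _SORTED_TABLE[mid]
--         if alias == x:
--             return key
--         if alias < x:
--             lo = mid + 1
--         else:
--             hi = mid
--     return None
-- ===== Notes on version B (the rewrite author's own statement) =====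
-- stated objective: alternative
-- what changed: Replaces A's nested linear scan over machine_dict's key->aliases lists with a pre-sorted flat (alias, key) table queried by a hand-written binary search (while lo < hi loop), returning None when the search interval empties.
import Mathlib
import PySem

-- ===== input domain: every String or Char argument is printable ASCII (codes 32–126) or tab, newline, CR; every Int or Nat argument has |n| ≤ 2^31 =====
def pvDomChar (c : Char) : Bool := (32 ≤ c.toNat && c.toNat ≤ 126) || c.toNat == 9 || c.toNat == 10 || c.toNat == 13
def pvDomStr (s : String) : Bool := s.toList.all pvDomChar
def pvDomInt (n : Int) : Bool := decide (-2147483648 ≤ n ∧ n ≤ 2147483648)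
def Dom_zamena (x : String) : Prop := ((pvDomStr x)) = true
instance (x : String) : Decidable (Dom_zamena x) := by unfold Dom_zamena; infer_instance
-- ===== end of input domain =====

-- B replaces A's nested linear scan with binary search over a sorted (al, key) table (alternative structure, same data).


-- ===== PORT A =====
-- the machine_dict literal, as an insertion-ordered association list
def machinePairs : List (String × List String) := [
  ("Nomura NN32-YB3", ["Nomura NN-32YB3"]),
  ("Nomura NN-10E", ["Nomura NN-10E"]),
  ("Nomura NN-20J2(1,2,3)", ["Nomura NN-20J2 (1)", "Nomura NN-20J2 (2)", "Nomura NN-20J2 (3)"]),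
  ("Nomura NN-20J3(4,5)", ["Nomura NN-20J3 (4)", "Nomura NN-20J3 (5)"]),
  ("Nomura NN-20J3XB80(6)", ["Nomura NN-20J3 (6)"]),
  ("Tsugami BO126 TF-III", ["Tsugami BO126TF-III"]),
  ("Tsugami BO126 TF-V", ["Tsugami BO126TF-5"]),
  ("Tsugami SS267-III", ["Tsugami SS267-III"]),
  ("Tsugami M08SY-II", ["Tsugami M08SY-II"]),
  ("Hanhwa XD20H", ["Hanwha XD20H"]),
  ("Nexturn SA-26PY", ["Nexturn SA-26PY"]),
  ("Nexturn SA-12B", ["Nexturn SA-12B (1)", "Nexturn SA-12B (2)"]),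
  ("Miyano BNJ-42SY", ["Miyano BNJ-42SY"]),
  ("Colchester T8MSY", ["Colchester T8MSY"]),
  ("SMEC-NS2100SY", ["SMEC NS2100SY"]),
  ("Citizen Cincom L12(1)", ["Citizen Cincom L12 (1)"]),
  ("Citizen Cincom L12(2)", ["Citizen Cincom L12 (2)"]),
  ("TFC-125", ["TFC-125"]),
  ("IRT", ["IRT"]),
  ("NomuraNN-16UB5", ["Nomura NN-16UB5"])
]

-- inner 'for a in v: if a==x: return k'
def zamenaInner (v : List String) (k x : String) : Option String :=
  match v with
  | [] => none
  | a :: rest => if a == x then some k else zamenaInner rest k x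

-- outer 'for k,v in machine_dict.items()' with early return; falls off the end -> None
def zamenaLoop (ps : List (String × List String)) (x : String) : Option String :=
  match ps with
  | [] => none
  | (k, v) :: rest =>
    match zamenaInner v k x with
    | some r => some r
    | none => zamenaLoop rest x

def zamena (x : String) : Option String := zamenaLoop machinePairs x

-- ===== PORT B =====
-- the sorted (al, key) literal of Source B
def sortedTable : List (String × String) := [
  ("Citizen Cincom L12 (1)", "Citizen Cincom L12(1)"),
  ("Citizen Cincom L12 (2)", "Citizen Cincom L12(2)"),
  ("Colchester T8MSY", "Colchester T8MSY"),
  ("Hanwha XD20H", "Hanhwa XD20H"),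
  ("IRT", "IRT"),
  ("Miyano BNJ-42SY", "Miyano BNJ-42SY"),
  ("Nexturn SA-12B (1)", "Nexturn SA-12B"),
  ("Nexturn SA-12B (2)", "Nexturn SA-12B"),
  ("Nexturn SA-26PY", "Nexturn SA-26PY"),
  ("Nomura NN-10E", "Nomura NN-10E"),
  ("Nomura NN-16UB5", "NomuraNN-16UB5"),
  ("Nomura NN-20J2 (1)", "Nomura NN-20J2(1,2,3)"),
  ("Nomura NN-20J2 (2)", "Nomura NN-20J2(1,2,3)"),
  ("Nomura NN-20J2 (3)", "Nomura NN-20J2(1,2,3)"),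
  ("Nomura NN-20J3 (4)", "Nomura NN-20J3(4,5)"),
  ("Nomura NN-20J3 (5)", "Nomura NN-20J3(4,5)"),
  ("Nomura NN-20J3 (6)", "Nomura NN-20J3XB80(6)"),
  ("Nomura NN-32YB3", "Nomura NN32-YB3"),
  ("SMEC NS2100SY", "SMEC-NS2100SY"),
  ("TFC-125", "TFC-125"),
  ("Tsugami BO126TF-5", "Tsugami BO126 TF-V"),
  ("Tsugami BO126TF-III", "Tsugami BO126 TF-III"),
  ("Tsugami M08SY-II", "Tsugami M08SY-II"),
  ("Tsugami SS267-III", "Tsugami SS267-III")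
]

-- the 'while lo < hi' binary-search loop of Source B; fuel ≥ hi - lo only makes the
-- structural recursion total (each step shrinks hi - lo), it never changes the result.
-- 'al.toList < x.toList' (List Char lexicographic) is exactly Python's 'alias < x'
-- code-point string comparison on this ASCII data.
def bsearch (t : List (String × String)) (fuel lo hi : Nat) (x : String) : Option String :=
  match fuel with
  | 0 => none
  | fuel + 1 =>
    if lo < hi then
      let mid := (lo + hi) / 2
      match t[mid]? with
      | none => none   -- unreachable: in Python mid < hi ≤ len(table)
      | some (al, key) =>
        if al == x then some key
        else if al.toList < x.toList then bsearch t fuel (mid + 1) hi x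
        else bsearch t fuel lo mid x
    else none

def zamena_alt (x : String) : Option String :=
  bsearch sortedTable sortedTable.length 0 sortedTable.length x

-- ===== PRECONDITION & SPEC =====
def Spec_zamena (x : String) (out : Option String) : Prop := out = zamena_alt x
instance (x : String) (out : Option String) : Decidable (Spec_zamena x out) := by unfold Spec_zamena; infer_instance

-- ===== CLAIM (what is proved, stated in full; the proofs are below) =====
def Claim_equal_zamena : Prop := ∀ (x : String), Dom_zamena x → Spec_zamena x (zamena x)

-- ===== LEMMAS AND PROOFS =====

-- the alias strings (all value strings of machine_dict = all firsts of sortedTable)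
def allAliases : List String := (sortedTable).map Prod.fst

-- A's inner loop returns some only on a match
theorem zamenaInner_some (v : List String) (k x r : String)
    (h : zamenaInner v k x = some r) : x ∈ v := by
  induction v with
  | nil => simp [zamenaInner] at h
  | cons a rest ih =>
    by_cases ha : (a == x) = true
    · exact (beq_iff_eq.mp ha) ▸ List.mem_cons_self
    · simp [zamenaInner, ha] at h
      exact List.mem_cons_of_mem _ (ih h)

-- A's outer loop returns some only when x occurs in some value list
theorem zamenaLoop_some (ps : List (String × List String)) (x r : String)
    (h : zamenaLoop ps x = some r) : ∃ p ∈ ps, x ∈ p.2 := by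
  induction ps with
  | nil => simp [zamenaLoop] at h
  | cons p rest ih =>
    obtain ⟨k, v⟩ := p
    cases hi : zamenaInner v k x with
    | some r' => exact ⟨(k, v), List.mem_cons_self, zamenaInner_some v k x r' hi⟩
    | none =>
      simp [zamenaLoop, hi] at h
      obtain ⟨q, hq, hx⟩ := ih h
      exact ⟨q, List.mem_cons_of_mem _ hq, hx⟩

-- B's binary search returns some only when (x, r) is an entry of the table
theorem bsearch_some (t : List (String × String)) (fuel lo hi : Nat) (x r : String)
    (h : bsearch t fuel lo hi x = some r) : (x, r) ∈ t := by
  induction fuel generalizing lo hi with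
  | zero => simp [bsearch] at h
  | succ fuel ih =>
    by_cases hlt : lo < hi
    · cases hg : t[(lo + hi) / 2]? with
      | none => simp [bsearch, hlt, hg] at h
      | some p =>
        obtain ⟨a, k⟩ := p
        by_cases ha : (a == x) = true
        · simp [bsearch, hlt, hg, ha] at h
          have := List.getElem?_eq_some_iff.mp hg
          obtain ⟨hlen, hge⟩ := this
          rw [← h, ← beq_iff_eq.mp ha]
          exact hge ▸ List.getElem_mem hlen
        · by_cases hab : a.toList < x.toList
          · simp [bsearch, hlt, hg, ha, hab] at h
            exact ih _ _ h
          · simp [bsearch, hlt, hg, ha, hab] at h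
            exact ih _ _ h
    · simp [bsearch, hlt] at h

-- every value string of machine_dict is an alias, and every table entry's first is too
theorem machinePairs_aliases : ∀ p ∈ machinePairs, ∀ a ∈ p.2, a ∈ allAliases := by decide

theorem sortedTable_aliases : ∀ q ∈ sortedTable, q.1 ∈ allAliases := by decide

-- on every alias the two ports agree (checked by evaluation)
theorem agree_on_aliases : ∀ a ∈ allAliases, zamena a = zamena_alt a := by decide

-- ===== VERDICT (by name: the statement is the Claim_ definition above) =====
theorem zamena_spec : Claim_equal_zamena := by
  intro x _
  show zamena x = zamena_alt x
  by_cases hx : x ∈ allAliases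
  · exact agree_on_aliases x hx
  · have hA : zamena x = none := by
      cases hA : zamena x with
      | none => rfl
      | some r =>
        obtain ⟨p, hp, hxv⟩ := zamenaLoop_some machinePairs x r hA
        exact absurd (machinePairs_aliases p hp x hxv) hx
    have hB : zamena_alt x = none := by
      cases hB : zamena_alt x with
      | none => rfl
      | some r =>
        have hm := bsearch_some sortedTable sortedTable.length 0 sortedTable.length x r hB
        exact absurd (sortedTable_aliases (x, r) hm) hx
    rw [hA, hB]
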